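-- pv_equiv track=rewrite | github.com/shashankagrawal24/regulatory-monitor | scraper/monitor.py | generate_content_angle
-- ===== SOURCE A (Python) =====
-- def generate_content_angle(title: str, category: str) -> str:
--     """Suggest a Novelty Wealth content angle."""
--     t = title.lower()
--     if any(w in t for w in ["new rule", "circular", "notification", "amendment", "revised"]):
--         return f"Explainer: What this {category.lower()} change means for you"
--     if any(w in t for w in ["rate cut", "rate hike", "repo"]):
--         return "Impact analysis: How this rate change affects your money"
--     if any(w in t for w in ["deadline", "last date", "due date"]):
--         return "Reminder + checklist content for users"
--     if any(w in t for w in ["scam", "fraud", "warning"]):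
--         return "Trust-building: How to protect yourself"
--     if any(w in t for w in ["market crash", "correction", "fall"]):
--         return "Calm-down content: What to do (and not do) right now"
--     return f"Educational explainer on this {category.lower()} development"
-- ===== SOURCE B (Python) =====
-- BUCKETS = {
--     "new rule": 0, "circular": 0, "notification": 0, "amendment": 0, "revised": 0,
--     "rate cut": 1, "rate hike": 1, "repo": 1,
--     "deadline": 2, "last date": 2, "due date": 2,
--     "scam": 3, "fraud": 3, "warning": 3,
--     "market crash": 4, "correction": 4, "fall": 4,
-- }
--
-- def generate_content_angle(title: str, category: str) -> str:
--     """Suggest a Novelty Wealth content angle."""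
--     t = title.lower()
--     c = category.lower()
--     best = min((b for k, b in BUCKETS.items() if k in t), default=5)
--     outputs = [
--         f"Explainer: What this {c} change means for you",
--         "Impact analysis: How this rate change affects your money",
--         "Reminder + checklist content for users",
--         "Trust-building: How to protect yourself",
--         "Calm-down content: What to do (and not do) right now",
--         f"Educational explainer on this {c} development",
--     ]
--     return outputs[best]
-- ===== Notes on version B (the rewrite author's own statement) =====
-- stated objective: alternative
-- what changed: Replaces A's ordered early-return if-chain with a different strategy: a keyword-to-priority map is scanned once, the MINIMUM priority among all matched keywords is computed (default 5), and that number indexes a table of output strings; no branch-ordered control flow remains.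
import Mathlib
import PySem

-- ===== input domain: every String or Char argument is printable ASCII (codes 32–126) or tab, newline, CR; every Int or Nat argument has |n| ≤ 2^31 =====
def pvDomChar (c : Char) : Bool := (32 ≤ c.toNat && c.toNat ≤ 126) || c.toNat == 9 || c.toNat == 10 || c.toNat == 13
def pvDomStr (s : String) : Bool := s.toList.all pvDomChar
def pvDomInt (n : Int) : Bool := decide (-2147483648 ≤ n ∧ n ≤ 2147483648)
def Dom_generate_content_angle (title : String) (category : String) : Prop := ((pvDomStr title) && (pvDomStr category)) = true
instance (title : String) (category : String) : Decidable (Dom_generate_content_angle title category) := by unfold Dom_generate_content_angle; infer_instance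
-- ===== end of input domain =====

-- B replaces A's ordered if-chain by computing the minimum priority over all matched keywords and indexing an output table (alternative algorithm, same cost).


-- ===== PORT A =====
def generate_content_angle (title : String) (category : String) : String :=
  let t := PySem.Str.lower title
  if ["new rule", "circular", "notification", "amendment", "revised"].any
      (fun w => PySem.Str.isIn w t) then
    "Explainer: What this " ++ PySem.Str.lower category ++ " change means for you"
  else if ["rate cut", "rate hike", "repo"].any (fun w => PySem.Str.isIn w t) then
    "Impact analysis: How this rate change affects your money"
  else if ["deadline", "last date", "due date"].any (fun w => PySem.Str.isIn w t) then
    "Reminder + checklist content for users"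
  else if ["scam", "fraud", "warning"].any (fun w => PySem.Str.isIn w t) then
    "Trust-building: How to protect yourself"
  else if ["market crash", "correction", "fall"].any (fun w => PySem.Str.isIn w t) then
    "Calm-down content: What to do (and not do) right now"
  else
    "Educational explainer on this " ++ PySem.Str.lower category ++ " development"

-- ===== PORT B =====
-- module-level keyword -> priority map (Python dict with distinct keys; items() order = this list)
def pvBuckets : List (String × Nat) :=
  [ ("new rule", 0), ("circular", 0), ("notification", 0), ("amendment", 0), ("revised", 0),
    ("rate cut", 1), ("rate hike", 1), ("repo", 1),
    ("deadline", 2), ("last date", 2), ("due date", 2),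
    ("scam", 3), ("fraud", 3), ("warning", 3),
    ("market crash", 4), ("correction", 4), ("fall", 4) ]

def generate_content_angle_alt (title : String) (category : String) : String :=
  let t := PySem.Str.lower title
  let c := PySem.Str.lower category
  -- min((b for k, b in BUCKETS.items() if k in t), default=5)
  let best : Nat :=
    (PySem.List.min? ((pvBuckets.filter (fun kb => PySem.Str.isIn kb.1 t)).map Prod.snd)
      (fun x => x)).getD 5
  let outputs : List String :=
    [ "Explainer: What this " ++ c ++ " change means for you",
      "Impact analysis: How this rate change affects your money",
      "Reminder + checklist content for users",
      "Trust-building: How to protect yourself",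
      "Calm-down content: What to do (and not do) right now",
      "Educational explainer on this " ++ c ++ " development" ]
  -- outputs[best]: best ∈ [0,5] is always in range, so plain positional indexing is exact
  outputs.getD best ""

-- ===== PRECONDITION & SPEC =====
def Spec_generate_content_angle (title : String) (category : String) (out : String) : Prop := out = generate_content_angle_alt title category
instance (title : String) (category : String) (out : String) : Decidable (Spec_generate_content_angle title category out) := by unfold Spec_generate_content_angle; infer_instance

-- ===== CLAIM (what is proved, stated in full; the proofs are below) =====
def Claim_equal_generate_content_angle : Prop := ∀ (title : String) (category : String), Dom_generate_content_angle title category → Spec_generate_content_angle title category (generate_content_angle title category)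

-- ===== LEMMAS AND PROOFS =====

-- folding min over a list whose elements are all the constant i
theorem pv_foldl_min_const (l : List Nat) (i : Nat) (h : ∀ x ∈ l, x = i) (acc : Nat) :
    l.foldl min acc = if l.isEmpty then acc else min acc i := by
  induction l generalizing acc with
  | nil => simp
  | cons x t ih =>
      have hx : x = i := h x (by simp)
      have ht : ∀ y ∈ t, y = i := fun y hy => h y (by simp [hy])
      simp [List.foldl, hx, ih ht]

-- min with default 5 over a list of numbers ≤ 4 is the running-min fold from 5
theorem pv_minD_eq_foldl (l : List Nat) (h : ∀ x ∈ l, x ≤ 4) :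
    (PySem.List.min? l (fun x => x)).getD 5 = l.foldl min 5 := by
  cases l with
  | nil => simp [PySem.List.min?]
  | cons x t =>
      have hx : min 5 x = x := Nat.min_eq_right (Nat.le_trans (h x (by simp)) (by norm_num))
      simp [PySem.List.min?_id_cons, List.foldl, hx]

-- the matched-priority list of one keyword group: all entries are that group's priority i
theorem pv_group_const (ws : List String) (i : Nat) (p : String × Nat → Bool) :
    ∀ x ∈ (((ws.map (fun w => (w, i))).filter p).map Prod.snd), x = i := by
  intro x hx
  simp only [List.mem_map, List.mem_filter] at hx
  obtain ⟨kb, ⟨⟨w, _, rfl⟩, _⟩, rfl⟩ := hx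
  rfl

-- a group contributes nothing iff none of its keywords occurs in t
theorem pv_group_empty_iff (ws : List String) (i : Nat) (t : String) :
    (((ws.map (fun w => (w, i))).filter (fun kb => PySem.Str.isIn kb.1 t)).map Prod.snd).isEmpty
      = !(ws.any (fun w => PySem.Str.isIn w t)) := by
  induction ws with
  | nil => simp
  | cons w rest ih =>
      simp only [PySem.Str.isIn] at ih ⊢
      cases h : PySem.Chars.isIn w.toList t.toList <;>
        simp [List.any, h, ih]

-- ===== VERDICT (by name: the statement is the Claim_ definition above) =====
theorem generate_content_angle_spec : Claim_equal_generate_content_angle := by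
  intro title category _
  unfold Spec_generate_content_angle generate_content_angle generate_content_angle_alt
  set t := PySem.Str.lower title with ht
  set p : String × Nat → Bool := fun kb => PySem.Str.isIn kb.1 t with hp
  have hsplit : pvBuckets
      = (["new rule", "circular", "notification", "amendment", "revised"].map (fun w => (w, 0)))
        ++ (["rate cut", "rate hike", "repo"].map (fun w => (w, 1)))
        ++ (["deadline", "last date", "due date"].map (fun w => (w, 2)))
        ++ (["scam", "fraud", "warning"].map (fun w => (w, 3)))
        ++ (["market crash", "correction", "fall"].map (fun w => (w, 4))) := by rfl
  rw [hsplit]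
  simp only [List.filter_append, List.map_append]
  -- the five per-group matched-priority lists
  set l0 := ((["new rule", "circular", "notification", "amendment", "revised"].map (fun w => (w, 0))).filter p).map Prod.snd with hl0
  set l1 := ((["rate cut", "rate hike", "repo"].map (fun w => (w, 1))).filter p).map Prod.snd with hl1
  set l2 := ((["deadline", "last date", "due date"].map (fun w => (w, 2))).filter p).map Prod.snd with hl2
  set l3 := ((["scam", "fraud", "warning"].map (fun w => (w, 3))).filter p).map Prod.snd with hl3
  set l4 := ((["market crash", "correction", "fall"].map (fun w => (w, 4))).filter p).map Prod.snd with hl4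
  have hc0 : ∀ x ∈ l0, x = 0 := pv_group_const _ _ _
  have hc1 : ∀ x ∈ l1, x = 1 := pv_group_const _ _ _
  have hc2 : ∀ x ∈ l2, x = 2 := pv_group_const _ _ _
  have hc3 : ∀ x ∈ l3, x = 3 := pv_group_const _ _ _
  have hc4 : ∀ x ∈ l4, x = 4 := pv_group_const _ _ _
  have hle : ∀ x ∈ l0 ++ l1 ++ l2 ++ l3 ++ l4, x ≤ 4 := by
    intro x hx
    simp only [List.mem_append] at hx
    rcases hx with ((((h | h) | h) | h) | h)
    · have := hc0 x h; omega
    · have := hc1 x h; omega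
    · have := hc2 x h; omega
    · have := hc3 x h; omega
    · have := hc4 x h; omega
  rw [pv_minD_eq_foldl _ hle]
  rw [List.foldl_append, List.foldl_append, List.foldl_append, List.foldl_append]
  rw [pv_foldl_min_const l0 0 hc0]
  rw [pv_foldl_min_const l1 1 hc1]
  rw [pv_foldl_min_const l2 2 hc2]
  rw [pv_foldl_min_const l3 3 hc3]
  rw [pv_foldl_min_const l4 4 hc4]
  have he0 : l0.isEmpty = !(["new rule", "circular", "notification", "amendment", "revised"].any (fun w => PySem.Str.isIn w t)) := pv_group_empty_iff _ _ _
  have he1 : l1.isEmpty = !(["rate cut", "rate hike", "repo"].any (fun w => PySem.Str.isIn w t)) := pv_group_empty_iff _ _ _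
  have he2 : l2.isEmpty = !(["deadline", "last date", "due date"].any (fun w => PySem.Str.isIn w t)) := pv_group_empty_iff _ _ _
  have he3 : l3.isEmpty = !(["scam", "fraud", "warning"].any (fun w => PySem.Str.isIn w t)) := pv_group_empty_iff _ _ _
  have he4 : l4.isEmpty = !(["market crash", "correction", "fall"].any (fun w => PySem.Str.isIn w t)) := pv_group_empty_iff _ _ _
  rw [he0, he1, he2, he3, he4]
  cases h0 : ["new rule", "circular", "notification", "amendment", "revised"].any (fun w => PySem.Str.isIn w t) <;>
  cases h1 : ["rate cut", "rate hike", "repo"].any (fun w => PySem.Str.isIn w t) <;>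
  cases h2 : ["deadline", "last date", "due date"].any (fun w => PySem.Str.isIn w t) <;>
  cases h3 : ["scam", "fraud", "warning"].any (fun w => PySem.Str.isIn w t) <;>
  cases h4 : ["market crash", "correction", "fall"].any (fun w => PySem.Str.isIn w t) <;>
    simp [h0, h1, h2, h3, h4]
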